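-- pv_equiv track=rewrite | github.com/project2025r/Raisetech | backend/utils/video_metadata_utils.py | _extract_camera_info_from_tags
-- ===== SOURCE A (Python) =====
-- def _extract_camera_info_from_tags(tags):
--     """Extract camera information from video metadata tags."""
--     camera_info = {}
--
--     camera_fields = {
--         'make': 'camera_make',
--         'MAKE': 'camera_make',
--         'model': 'camera_model',
--         'MODEL': 'camera_model',
--         'software': 'software',
--         'SOFTWARE': 'software',
--         'encoder': 'encoder',
--         'ENCODER': 'encoder'
--     }
--
--     for tag_field, meta_field in camera_fields.items():
--         if tag_field in tags:
--             camera_info[meta_field] = str(tags[tag_field])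
--
--     return camera_info
-- ===== SOURCE B (Python) =====
-- _RELEVANT = ('make', 'MAKE', 'model', 'MODEL',
--              'software', 'SOFTWARE', 'encoder', 'ENCODER')
--
-- _GROUPS = (('camera_make', ('make', 'MAKE')),
--            ('camera_model', ('model', 'MODEL')),
--            ('software', ('software', 'SOFTWARE')),
--            ('encoder', ('encoder', 'ENCODER')))
--
--
-- def _extract_camera_info_from_tags(tags):
--     """Extract camera information from video metadata tags."""
--     # Pass 1: one scan over the tags, keeping only the relevant keys
--     # (setdefault: a dict has unique keys anyway, first occurrence wins).
--     found = {}
--     for k, v in tags.items():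
--         if k in _RELEVANT:
--             found.setdefault(k, str(v))
--     # Pass 2: assemble the output in field order; within a group the
--     # last present candidate (the upper-case key) wins.
--     camera_info = {}
--     for field, candidates in _GROUPS:
--         present = [found[c] for c in candidates if c in found]
--         if present:
--             camera_info[field] = present[-1]
--     return camera_info
-- ===== Notes on version B (the rewrite author's own statement) =====
-- stated objective: alternative
-- what changed: A loops over a fixed schema of 8 key->field pairs, probing the tags dict and overwriting an output dict; B instead scans the tags data once collecting the relevant keys into a 'found' dict and then assembles the output in a second pass over 4 grouped fields, taking the last present candidate per group.
import Mathlib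
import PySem

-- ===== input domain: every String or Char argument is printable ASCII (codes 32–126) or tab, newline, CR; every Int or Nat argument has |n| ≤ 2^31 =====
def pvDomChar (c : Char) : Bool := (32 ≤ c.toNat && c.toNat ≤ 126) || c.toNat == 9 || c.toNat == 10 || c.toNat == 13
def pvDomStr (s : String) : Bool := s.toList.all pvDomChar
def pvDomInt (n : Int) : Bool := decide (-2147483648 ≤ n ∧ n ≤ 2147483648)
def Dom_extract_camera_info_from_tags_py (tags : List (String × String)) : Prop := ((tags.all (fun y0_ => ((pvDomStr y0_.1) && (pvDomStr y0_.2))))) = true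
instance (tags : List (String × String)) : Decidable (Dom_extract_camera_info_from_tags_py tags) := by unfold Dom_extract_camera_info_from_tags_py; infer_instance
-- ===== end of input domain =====

-- B replaces A's schema-driven probe loop (8 key->field pairs, overwriting one dict)
-- by a two-pass data scan: collect the relevant tag keys once, then assemble the four
-- grouped output fields; same return value, objective: alternative structure.

-- ===== PORT A =====
-- Transliteration of A: a flat loop over the 8 (tag_field, meta_field) pairs,
-- inserting str(tags[tag_field]) whenever tag_field is present (overwrite keeps position).
def extract_camera_info_from_tags_py (tags : List (String × String)) : List (String × String) :=
  let t : PySem.Dict String String := PySem.Dict.mk tags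
  let camera_fields : List (String × String) :=
    [("make", "camera_make"), ("MAKE", "camera_make"),
     ("model", "camera_model"), ("MODEL", "camera_model"),
     ("software", "software"), ("SOFTWARE", "software"),
     ("encoder", "encoder"), ("ENCODER", "encoder")]
  (camera_fields.foldl
    (fun ci p =>
      if t.contains p.1 then ci.insert p.2 ((t.get? p.1).getD "") else ci)
    PySem.Dict.empty).items

-- ===== PORT B =====
-- Transliteration of B (Source B): pass 1 scans the tag items collecting the relevant
-- keys into `found` via setdefault; pass 2 loops over the four field groups and
-- keeps the last present candidate of each group.
def pvRelevant : List String :=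
  ["make", "MAKE", "model", "MODEL", "software", "SOFTWARE", "encoder", "ENCODER"]

def pvGroups : List (String × List String) :=
  [("camera_make", ["make", "MAKE"]), ("camera_model", ["model", "MODEL"]),
   ("software", ["software", "SOFTWARE"]), ("encoder", ["encoder", "ENCODER"])]

def extract_camera_info_from_tags_py_alt (tags : List (String × String)) : List (String × String) :=
  let found : PySem.Dict String String :=
    tags.foldl (fun d p => if p.1 ∈ pvRelevant then d.setdefault p.1 p.2 else d)
      PySem.Dict.empty
  (pvGroups.foldl
    (fun ci g =>
      let present := g.2.filterMap (fun c => found.get? c)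
      match present.getLast? with
      | some v => ci.insert g.1 v
      | none => ci)
    PySem.Dict.empty).items

-- ===== PRECONDITION & SPEC =====
def Spec_extract_camera_info_from_tags_py (tags : List (String × String)) (out : List (String × String)) : Prop := out = extract_camera_info_from_tags_py_alt tags
instance (tags : List (String × String)) (out : List (String × String)) : Decidable (Spec_extract_camera_info_from_tags_py tags out) := by unfold Spec_extract_camera_info_from_tags_py; infer_instance

-- ===== CLAIM (what is proved, stated in full; the proofs are below) =====
def Claim_equal_extract_camera_info_from_tags_py : Prop := ∀ (tags : List (String × String)), Dom_extract_camera_info_from_tags_py tags → Spec_extract_camera_info_from_tags_py tags (extract_camera_info_from_tags_py tags)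

-- ===== LEMMAS AND PROOFS =====

-- setdefault keeps existing keys/other keys untouched at the get? level
theorem pv_get?_setdefault_of_ne (d : PySem.Dict String String) (k c : String) (v : String)
    (h : c ≠ k) : (d.setdefault k v).get? c = d.get? c := by
  by_cases hk : d.contains k = true
  · rw [PySem.Dict.setdefault_of_contains d v hk]
  · rw [PySem.Dict.setdefault_of_not_contains d v (by simpa using hk),
      PySem.Dict.get?_insert_of_ne d v h]

-- pass 1's `found` answers first-match lookups exactly like the input dict on relevant keys
theorem pv_found_get? (c : String) (l : List (String × String))
    (d : PySem.Dict String String) (hc : c ∈ pvRelevant) :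
    (l.foldl (fun d p => if p.1 ∈ pvRelevant then d.setdefault p.1 p.2 else d) d).get? c
      = (d.get? c).or ((PySem.Dict.mk l).get? c) := by
  induction l generalizing d with
  | nil =>
      simp [PySem.Dict.get?]
  | cons p t ih =>
      obtain ⟨k, v⟩ := p
      simp only [List.foldl_cons, ih, PySem.Dict.get?_mk_cons]
      by_cases hkc : k = c
      · subst hkc
        rw [if_pos hc, PySem.Dict.get?_setdefault_self]
        cases d.get? k <;> simp [Option.or]
      · have hne : (k == c) = false := by simpa using hkc
        simp only [hne, Bool.false_eq_true, if_false]
        by_cases hr : k ∈ pvRelevant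
        · rw [if_pos hr, pv_get?_setdefault_of_ne d k c v (Ne.symm hkc)]
        · rw [if_neg hr]

-- ===== VERDICT (by name: the statement is the Claim_ definition above) =====
theorem extract_camera_info_from_tags_py_spec : Claim_equal_extract_camera_info_from_tags_py := by
  intro tags _
  unfold Spec_extract_camera_info_from_tags_py
  unfold extract_camera_info_from_tags_py extract_camera_info_from_tags_py_alt
  simp only []
  set t : PySem.Dict String String := PySem.Dict.mk tags with ht
  have hfound : ∀ c : String, c ∈ pvRelevant →
      (tags.foldl (fun d p => if p.1 ∈ pvRelevant then d.setdefault p.1 p.2 else d)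
        PySem.Dict.empty).get? c = t.get? c := by
    intro c hc
    rw [pv_found_get? c tags PySem.Dict.empty hc, ht]
    simp [PySem.Dict.get?_empty, Option.or]
  simp only [pvGroups, List.foldl_cons, List.foldl_nil, List.filterMap]
  rw [hfound "make" (by decide), hfound "MAKE" (by decide),
    hfound "model" (by decide), hfound "MODEL" (by decide),
    hfound "software" (by decide), hfound "SOFTWARE" (by decide),
    hfound "encoder" (by decide), hfound "ENCODER" (by decide)]
  simp only [PySem.Dict.contains_eq_isSome_get?]
  generalize t.get? "make" = o1
  generalize t.get? "MAKE" = o2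
  generalize t.get? "model" = o3
  generalize t.get? "MODEL" = o4
  generalize t.get? "software" = o5
  generalize t.get? "SOFTWARE" = o6
  generalize t.get? "encoder" = o7
  generalize t.get? "ENCODER" = o8
  rcases o1 with _ | v1 <;> rcases o2 with _ | v2 <;> rcases o3 with _ | v3 <;>
    rcases o4 with _ | v4 <;> rcases o5 with _ | v5 <;> rcases o6 with _ | v6 <;>
    rcases o7 with _ | v7 <;> rcases o8 with _ | v8 <;>
    simp [PySem.Dict.items_insert, PySem.Dict.contains_insert, PySem.Dict.empty]
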